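-- pv_equiv track=rewrite | github.com/pyglet/pyglet | pyglet/input/evdev.py | get_set_bits
-- ===== SOURCE A (Python) =====
-- def get_set_bits(bytestring):
--     bits = set()
--     j = 0
--     for byte in bytestring:
--         for i in range(8):
--             if byte & 1:
--                 bits.add(j + i)
--             byte >>= 1
--         j += 8
--     return bits
-- ===== SOURCE B (Python) =====
-- def get_set_bits(bytestring):
--     bits = set()
--     for j, byte in enumerate(bytestring):
--         v = byte & 255
--         base = 8 * j
--         while v:
--             v2 = v & (v - 1)
--             bits.add(base + (v ^ v2).bit_length() - 1)
--             v = v2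
--     return bits
-- ===== Notes on version B (the rewrite author's own statement) =====
-- stated objective: alternative
-- what changed: B replaces A's fixed test-all-8-positions inner loop (shifting the byte right each step) with a sparse inner loop over byte & 255 that visits only the set bits via the lowest-set-bit trick v & (v-1) and bit_length.
import Mathlib
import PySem

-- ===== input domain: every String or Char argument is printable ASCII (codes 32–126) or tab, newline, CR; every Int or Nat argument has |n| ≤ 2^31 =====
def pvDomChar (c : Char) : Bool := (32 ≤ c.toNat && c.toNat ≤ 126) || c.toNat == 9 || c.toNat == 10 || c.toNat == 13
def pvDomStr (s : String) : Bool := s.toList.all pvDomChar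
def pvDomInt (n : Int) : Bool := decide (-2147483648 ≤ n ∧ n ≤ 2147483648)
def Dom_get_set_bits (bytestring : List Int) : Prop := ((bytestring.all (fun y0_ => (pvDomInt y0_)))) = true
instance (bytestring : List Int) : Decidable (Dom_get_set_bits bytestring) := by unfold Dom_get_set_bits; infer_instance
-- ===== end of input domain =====

-- B replaces A's fixed test-all-8-positions inner loop with a sparse loop over the set bits of
-- byte & 255 (lowest-set-bit trick v & (v-1), bit_length); same returned set, objective: alternative.

-- ===== PORT A =====
def get_set_bits (bytestring : List Int) : List Int :=
  (bytestring.foldl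
    (fun (st : PySem.Set Int × Int) byte =>
      let inner := (PySem.List.pyRange 0 8 1).foldl
        (fun (p : PySem.Set Int × Int) i =>
          ((if PySem.Int.band p.2 1 ≠ 0 then PySem.Set.add p.1 (st.2 + i) else p.1), p.2 >>> (1:Nat)))
        (st.1, byte)
      (inner.1, st.2 + 8))
    (PySem.Set.empty, 0)).1

-- ===== PORT B =====
-- B's 'while v:' loop; v = byte & 255 is nonnegative and strictly decreases (v & (v-1) clears the
-- lowest set bit), so fuel = v.toNat iterations always suffice: the fuel is only a totality guard.
def bLoopB (base : Int) : Nat → Int → PySem.Set Int → PySem.Set Int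
  | 0, _, bits => bits
  | fuel + 1, v, bits =>
    if v ≠ 0 then
      let v2 := PySem.Int.band v (v - 1)
      bLoopB base fuel v2
        (PySem.Set.add bits (base + ((PySem.Int.bitLength (PySem.Int.bxor v v2) : Int) - 1)))
    else bits

def get_set_bits_alt (bytestring : List Int) : List Int :=
  (PySem.List.enumerate bytestring 0).foldl
    (fun bits jb =>
      let v := PySem.Int.band jb.2 255
      bLoopB (8 * jb.1) v.toNat v bits)
    PySem.Set.empty

-- ===== PRECONDITION & SPEC =====
def Spec_get_set_bits (bytestring : List Int) (out : List Int) : Prop := out = get_set_bits_alt bytestring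
instance (bytestring : List Int) (out : List Int) : Decidable (Spec_get_set_bits bytestring out) := by unfold Spec_get_set_bits; infer_instance

-- ===== CLAIM (what is proved, stated in full; the proofs are below) =====
def Claim_equal_get_set_bits : Prop := ∀ (bytestring : List Int), Dom_get_set_bits bytestring → Spec_get_set_bits bytestring (get_set_bits bytestring)

-- ===== LEMMAS AND PROOFS =====

-- offsets (0..7) emitted by A's inner loop while scanning the bits of b along a list of indices
def emitsL : List Int → Int → List Int
  | [], _ => []
  | i :: is, b => (if PySem.Int.band b 1 ≠ 0 then [i] else []) ++ emitsL is (b >>> (1:Nat))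

-- offsets emitted by B's while-loop
def emitsB : Nat → Int → List Int
  | 0, _ => []
  | fuel + 1, v =>
    if v ≠ 0 then
      let v2 := PySem.Int.band v (v - 1)
      ((PySem.Int.bitLength (PySem.Int.bxor v v2) : Int) - 1) :: emitsB fuel v2
    else []

lemma shiftRight_one_eq (b : Int) : b >>> (1:Nat) = b / 2 := by
  cases b with
  | ofNat n =>
    show ((n >>> 1 : Nat) : Int) = ((n : Int)) / 2
    rw [Nat.shiftRight_one]
    omega
  | negSucc n =>
    show Int.negSucc (n >>> 1) = Int.negSucc n / 2
    rw [Nat.shiftRight_one]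
    simp [Int.negSucc_eq]
    omega

lemma band_255_eq (b : Int) : PySem.Int.band b 255 = b % 256 := by
  by_cases h : 0 ≤ b
  · rw [PySem.Int.band_of_nonneg h (by norm_num)]
    have : b.toNat &&& (255:Int).toNat = b.toNat % 256 := by
      have := Nat.and_two_pow_sub_one_eq_mod b.toNat 8
      norm_num at this ⊢
      exact this
    rw [this]
    omega
  · have hb : PySem.Int.band b 255 = ((255 - (255 &&& ((-b).toNat - 1)) : Nat) : Int) := by
      rw [PySem.Int.band]
      simp only [h, if_false]
      norm_num
      rfl
    have hand : (255:Nat) &&& ((-b).toNat - 1) = ((-b).toNat - 1) % 256 := by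
      rw [Nat.land_comm]
      have := Nat.and_two_pow_sub_one_eq_mod ((-b).toNat - 1) 8
      norm_num at this ⊢
      exact this
    rw [hb, hand]
    omega

-- A's inner fold collects exactly the adds of (j + c) for c in emitsL
lemma innerA_eq_emits (is : List Int) (b : Int) (bits : PySem.Set Int) (j : Int) :
    (is.foldl
      (fun (p : PySem.Set Int × Int) i =>
        ((if PySem.Int.band p.2 1 ≠ 0 then PySem.Set.add p.1 (j + i) else p.1), p.2 >>> (1:Nat)))
      (bits, b)).1
    = (emitsL is b).foldl (fun s c => PySem.Set.add s (j + c)) bits := by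
  induction is generalizing b bits with
  | nil => rfl
  | cons i is ih =>
    by_cases h : PySem.Int.band b 1 ≠ 0
    · simp only [List.foldl_cons, emitsL, if_pos h, List.foldl_append, List.foldl_cons,
        List.foldl_nil]
      exact ih _ _
    · simp only [List.foldl_cons, emitsL, if_neg h, List.nil_append]
      exact ih _ _

-- B's while-loop collects exactly the adds of (base + c) for c in emitsB
lemma bLoopB_eq_emits (fuel : Nat) (v base : Int) (bits : PySem.Set Int) :
    bLoopB base fuel v bits
    = (emitsB fuel v).foldl (fun s c => PySem.Set.add s (base + c)) bits := by
  induction fuel generalizing v bits with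
  | zero => rfl
  | succ fuel ih =>
    simp only [bLoopB, emitsB]
    by_cases h : v ≠ 0
    · simp [h, ih]
    · simp [h]

-- A's emitted offsets only depend on the low 8 bits of b
lemma emitsL_mod256 (b : Int) :
    emitsL (PySem.List.pyRange 0 8 1) b = emitsL (PySem.List.pyRange 0 8 1) (b % 256) := by
  have hr : PySem.List.pyRange 0 8 1 = [0, 1, 2, 3, 4, 5, 6, 7] := by decide
  have h0 : b % 2 = (b % 256) % 2 := by omega
  have h1 : (b / 2) % 2 = ((b % 256) / 2) % 2 := by omega
  have h2 : (b / 2 / 2) % 2 = ((b % 256) / 2 / 2) % 2 := by omega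
  have h3 : (b / 2 / 2 / 2) % 2 = ((b % 256) / 2 / 2 / 2) % 2 := by omega
  have h4 : (b / 2 / 2 / 2 / 2) % 2 = ((b % 256) / 2 / 2 / 2 / 2) % 2 := by omega
  have h5 : (b / 2 / 2 / 2 / 2 / 2) % 2 = ((b % 256) / 2 / 2 / 2 / 2 / 2) % 2 := by omega
  have h6 : (b / 2 / 2 / 2 / 2 / 2 / 2) % 2 = ((b % 256) / 2 / 2 / 2 / 2 / 2 / 2) % 2 := by omega
  have h7 : (b / 2 / 2 / 2 / 2 / 2 / 2 / 2) % 2 = ((b % 256) / 2 / 2 / 2 / 2 / 2 / 2 / 2) % 2 := by omega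
  have hm : ∀ a : Int, PySem.Int.band a 1 = a % 2 := by
    intro a
    rw [PySem.Int.band_one, PySem.Int.mod_eq_emod_of_pos (by norm_num)]
  simp only [hr, emitsL, shiftRight_one_eq, hm]
  rw [h0, h1, h2, h3, h4, h5, h6, h7]

-- the two emitted offset lists agree on every byte value 0..255
set_option maxRecDepth 8192 in
lemma emits_eq_small : ∀ n : Fin 256,
    emitsL (PySem.List.pyRange 0 8 1) ((n : Nat) : Int)
      = emitsB ((n : Nat)) ((n : Nat) : Int) := by decide

-- combined per-byte lemma
lemma byte_step (b j : Int) (bits : PySem.Set Int) :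
    ((PySem.List.pyRange 0 8 1).foldl
      (fun (p : PySem.Set Int × Int) i =>
        ((if PySem.Int.band p.2 1 ≠ 0 then PySem.Set.add p.1 (j + i) else p.1), p.2 >>> (1:Nat)))
      (bits, b)).1
    = bLoopB j (PySem.Int.band b 255).toNat (PySem.Int.band b 255) bits := by
  rw [innerA_eq_emits, bLoopB_eq_emits, emitsL_mod256, band_255_eq]
  have hlt : (b % 256).toNat < 256 := by omega
  have hcast : ((b % 256).toNat : Int) = b % 256 := by omega
  have := emits_eq_small ⟨(b % 256).toNat, hlt⟩
  rw [← hcast, this, Int.toNat_natCast]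

-- main loop correspondence: A's running offset j equals 8 * (enumerate counter k)
lemma main_loop (bs : List Int) (k : Int) (bits : PySem.Set Int) :
    (bs.foldl
      (fun (st : PySem.Set Int × Int) byte =>
        let inner := (PySem.List.pyRange 0 8 1).foldl
          (fun (p : PySem.Set Int × Int) i =>
            ((if PySem.Int.band p.2 1 ≠ 0 then PySem.Set.add p.1 (st.2 + i) else p.1), p.2 >>> (1:Nat)))
          (st.1, byte)
        (inner.1, st.2 + 8))
      (bits, 8 * k)).1
    = (PySem.List.enumerate bs k).foldl
        (fun bits jb =>
          let v := PySem.Int.band jb.2 255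
          bLoopB (8 * jb.1) v.toNat v bits)
        bits := by
  induction bs generalizing k bits with
  | nil => rfl
  | cons b bs ih =>
    rw [PySem.List.enumerate_cons]
    simp only [List.foldl]
    rw [byte_step]
    have : (8 : Int) * k + 8 = 8 * (k + 1) := by ring
    rw [this, ih]

-- ===== VERDICT (by name: the statement is the Claim_ definition above) =====
theorem get_set_bits_spec : Claim_equal_get_set_bits := by
  intro bs _
  show get_set_bits bs = get_set_bits_alt bs
  unfold get_set_bits get_set_bits_alt
  have := main_loop bs 0 PySem.Set.empty
  simpa using this
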